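-- pv_equiv track=rewrite | github.com/clauciorank/SIM-DataSUS-TabNot | src/agent/cid10_resolver.py | format_causas_for_sql
-- ===== SOURCE A (Python) =====
-- from typing import List, Dict, Any, Optional
--
-- def format_causas_for_sql(
--     candidates: List[Dict[str, str]],
--     by_chapter: bool = False,
--     max_codes_per_prefix: int = 12,
-- ) -> str:
--     """
--     Formata candidatos para instrução SQL no contexto do planejador.
--     - by_chapter=True: causa_cid10_capitulo_desc IN ('Capítulo I...', ...).
--     - by_chapter=False: agrupa por prefixo 3 chars; se muitos códigos usa LIKE 'A90%', senão IN (...).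
--     """
--     if not candidates:
--         return ""
--     if by_chapter:
--         capítulos = list({c.get("capitulo_descricao") or "" for c in candidates if c.get("capitulo_descricao")})
--         capítulos = [c for c in capítulos if c]
--         if not capítulos:
--             return ""
--         # Escapar aspas simples para SQL
--         quoted = [f"'{str(c).replace(chr(39), chr(39)+chr(39))}'" for c in capítulos]
--         return f"causa_cid10_capitulo_desc IN ({', '.join(quoted)})"
--     # Agrupar por prefixo de 3 caracteres (ex.: A90, I21)
--     # Normalizar códigos: base SIM costuma ter causa_basica SEM ponto (ex.: I219, A90); depara pode vir com I21.9
--     from collections import defaultdict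
--     by_prefix: Dict[str, List[str]] = defaultdict(list)
--     for c in candidates:
--         cod = (c.get("codigo") or "").strip().replace(".", "")
--         if not cod:
--             continue
--         prefix = cod[:3] if len(cod) >= 3 else cod
--         by_prefix[prefix].append(cod)
--     parts = []
--     for prefix, codigos in sorted(by_prefix.items()):
--         codigos = list(dict.fromkeys(codigos))
--         if len(codigos) > max_codes_per_prefix:
--             parts.append(f"causa_basica LIKE '{prefix}%'")
--         else:
--             quoted = [f"'{str(c).replace(chr(39), chr(39)+chr(39))}'" for c in codigos]
--             parts.append(f"causa_basica IN ({', '.join(quoted)})")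
--     return " OR ".join(parts) if parts else ""
-- ===== SOURCE B (Python) =====
-- from typing import List, Dict
--
--
-- def format_causas_for_sql(
--     candidates: List[Dict[str, str]],
--     by_chapter: bool = False,
--     max_codes_per_prefix: int = 12,
-- ) -> str:
--     if not candidates:
--         return ""
--
--     def quote(s: str) -> str:
--         return "'" + s.replace("'", "''") + "'"
--
--     if by_chapter:
--         chapters = [c.get("capitulo_descricao") or "" for c in candidates]
--         chapters = [c for c in dict.fromkeys(chapters) if c]
--         if not chapters:
--             return ""
--         return "causa_cid10_capitulo_desc IN (%s)" % ", ".join(quote(c) for c in chapters)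
--
--     norm = [(c.get("codigo") or "").strip().replace(".", "") for c in candidates]
--     pairs = [(cod[:3], cod) for cod in norm if cod]
--     parts = []
--     for prefix in sorted(dict.fromkeys(p for p, _ in pairs)):
--         codes = list(dict.fromkeys(cod for p, cod in pairs if p == prefix))
--         if len(codes) > max_codes_per_prefix:
--             parts.append("causa_basica LIKE '%s%%'" % prefix)
--         else:
--             parts.append("causa_basica IN (%s)" % ", ".join(quote(c) for c in codes))
--     return " OR ".join(parts)
-- ===== Notes on version B (the rewrite author's own statement) =====
-- stated objective: alternative
-- what changed: B replaces A's defaultdict grouping plus sorted(items) with a dict-free decomposition: build a (prefix, code) pair list, iterate over the sorted distinct prefixes and collect each group's codes by a per-prefix filter; the by_chapter branch dedups with dict.fromkeys in first-occurrence order instead of a set.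
import Mathlib
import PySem

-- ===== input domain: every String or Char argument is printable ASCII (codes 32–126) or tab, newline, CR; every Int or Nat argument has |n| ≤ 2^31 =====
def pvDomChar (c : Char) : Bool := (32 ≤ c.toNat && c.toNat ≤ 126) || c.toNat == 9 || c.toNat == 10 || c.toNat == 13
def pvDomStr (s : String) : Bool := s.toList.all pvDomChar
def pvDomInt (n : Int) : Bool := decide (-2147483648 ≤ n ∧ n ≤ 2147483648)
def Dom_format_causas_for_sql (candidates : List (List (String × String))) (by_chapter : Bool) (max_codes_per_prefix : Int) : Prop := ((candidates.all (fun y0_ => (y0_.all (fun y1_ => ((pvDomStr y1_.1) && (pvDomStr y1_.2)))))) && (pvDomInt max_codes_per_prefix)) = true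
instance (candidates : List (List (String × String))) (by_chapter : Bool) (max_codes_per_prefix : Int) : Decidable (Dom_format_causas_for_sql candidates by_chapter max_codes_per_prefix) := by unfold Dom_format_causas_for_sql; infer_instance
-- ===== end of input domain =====

-- ===== PORT A =====
-- B re-decomposes the grouping: no dict — a pair list, sorted distinct prefixes, and a per-prefix
-- filter (objective: alternative). Pre_ restricts only the by_chapter branch (Python set iteration order).

def pvGetOr (c : List (String × String)) (k : String) : String :=
  ((PySem.Dict.mk c).get? k).getD ""
def pvQuote (s : String) : String :=
  "'" ++ PySem.Str.replace s "'" "''" ++ "'"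
def pvNormCod (c : List (String × String)) : String :=
  PySem.Str.replace (PySem.Str.strip (pvGetOr c "codigo")) "." ""
def format_causas_for_sql (candidates : List (List (String × String))) (by_chapter : Bool) (max_codes_per_prefix : Int) : String :=
  if candidates = [] then ""
  else if by_chapter then
    let caps : PySem.Set String := PySem.Set.ofList (candidates.foldl (fun acc c =>
      let v := pvGetOr c "capitulo_descricao"
      if v ≠ "" then acc ++ [v] else acc) [])
    let caps2 := caps.filter (fun c => c ≠ "")
    if caps2 = [] then ""
    else "causa_cid10_capitulo_desc IN (" ++ PySem.Str.join ", " (caps2.map pvQuote) ++ ")"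
  else
    let by_prefix : PySem.Dict String (List String) := candidates.foldl (fun d c =>
      let cod := pvNormCod c
      if cod = "" then d
      else
        let pfx := if 3 ≤ PySem.Str.len cod then PySem.Str.slice cod none (some 3) else cod
        d.modify pfx [] (· ++ [cod])) PySem.Dict.empty
    let parts := (PySem.List.sorted by_prefix.items (fun p => p.1) false).foldl (fun parts pc =>
      let codigos := PySem.List.dedup pc.2
      if max_codes_per_prefix < (codigos.length : Int) then
        parts ++ ["causa_basica LIKE '" ++ pc.1 ++ "%'"]
      else
        parts ++ ["causa_basica IN (" ++ PySem.Str.join ", " (codigos.map pvQuote) ++ ")"]) []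
    if parts ≠ [] then PySem.Str.join " OR " parts else ""
def format_causas_for_sql_alt (candidates : List (List (String × String))) (by_chapter : Bool) (max_codes_per_prefix : Int) : String :=
  if candidates = [] then ""
  else if by_chapter then
    let chapters := candidates.map (fun c => pvGetOr c "capitulo_descricao")
    let chapters2 := (PySem.List.dedup chapters).filter (fun c => c ≠ "")
    if chapters2 = [] then ""
    else "causa_cid10_capitulo_desc IN (" ++ PySem.Str.join ", " (chapters2.map pvQuote) ++ ")"
  else
    let norm := candidates.map pvNormCod
    let pairs := (norm.filter (fun cod => cod ≠ "")).map (fun cod => (PySem.Str.slice cod none (some 3), cod))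
    let parts := (PySem.List.sorted (PySem.List.dedup (pairs.map (·.1))) (fun p => p) false).map (fun pfx =>
      let codes := PySem.List.dedup ((pairs.filter (fun p => p.1 == pfx)).map (·.2))
      if max_codes_per_prefix < (codes.length : Int) then
        "causa_basica LIKE '" ++ pfx ++ "%'"
      else
        "causa_basica IN (" ++ PySem.Str.join ", " (codes.map pvQuote) ++ ")")
    PySem.Str.join " OR " parts

-- ===== PRECONDITION & SPEC =====
-- Pre_ excludes inputs with by_chapter=True and two or more distinct non-empty "capitulo_descricao"
-- values, on which the order of A's IN(...) list is an accident of Python's set iteration order.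
def Pre_format_causas_for_sql (candidates : List (List (String × String))) (by_chapter : Bool) (max_codes_per_prefix : Int) : Prop :=
  by_chapter = true →
    (PySem.List.dedup (candidates.filterMap (fun c =>
      let v := pvGetOr c "capitulo_descricao"
      if v = "" then none else some v))).length ≤ 1
instance (candidates : List (List (String × String))) (by_chapter : Bool) (max_codes_per_prefix : Int) : Decidable (Pre_format_causas_for_sql candidates by_chapter max_codes_per_prefix) := by unfold Pre_format_causas_for_sql; infer_instance

def pvWitness_format_causas_for_sql : (List (List (String × String))) × Bool × Int :=
  ([[("codigo", "I21.9"), ("capitulo_descricao", "Cap IX")], [("codigo", "I219")], [("codigo", "A90")]], false, 2)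

def Spec_format_causas_for_sql (candidates : List (List (String × String))) (by_chapter : Bool) (max_codes_per_prefix : Int) (out : String) : Prop := out = format_causas_for_sql_alt candidates by_chapter max_codes_per_prefix
instance (candidates : List (List (String × String))) (by_chapter : Bool) (max_codes_per_prefix : Int) (out : String) : Decidable (Spec_format_causas_for_sql candidates by_chapter max_codes_per_prefix out) := by unfold Spec_format_causas_for_sql; infer_instance

-- ===== CLAIM (what is proved, stated in full; the proofs are below) =====
def Claim_equal_format_causas_for_sql : Prop := ∀ (candidates : List (List (String × String))) (by_chapter : Bool) (max_codes_per_prefix : Int), Dom_format_causas_for_sql candidates by_chapter max_codes_per_prefix → Pre_format_causas_for_sql candidates by_chapter max_codes_per_prefix → Spec_format_causas_for_sql candidates by_chapter max_codes_per_prefix (format_causas_for_sql candidates by_chapter max_codes_per_prefix)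

-- ===== LEMMAS AND PROOFS =====

-- cod[:3] equals cod when len(cod) < 3
theorem pv_slice3_short (s : String) (h : ¬ 3 ≤ PySem.Str.len s) :
    PySem.Str.slice s none (some 3) = s := by
  have h' : s.toList.length < 3 := by simp [PySem.Str.len] at h; exact_mod_cast h
  have h2 : PySem.Chars.slice s.toList none (some 3) = s.toList.take 3 := by
    simpa using PySem.List.slice_to_natCast (xs := s.toList) (b := 3)
  rw [PySem.Str.slice, PySem.Chars.slice] at *
  rw [h2, List.take_of_length_le (by omega)]
  exact String.ofList_toList

-- two Nodup lists of strings with the same members, one of length ≤ 1, are equal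
theorem pv_nodup_same_mem_le_one (l m : List String) (hl : l.Nodup) (hm : m.Nodup)
    (hmem : ∀ x, x ∈ l ↔ x ∈ m) (hlen : m.length ≤ 1) : l = m := by
  match m, hlen with
  | [], _ =>
    cases l with
    | nil => rfl
    | cons a t => exact absurd ((hmem a).mp (by simp)) (by simp)
  | [a], _ =>
    have hma : ∀ x, x ∈ l ↔ x = a := by simpa using hmem
    cases l with
    | nil => exact absurd ((hma a).mpr rfl) (by simp)
    | cons b t =>
      have hb : b = a := (hma b).mp (by simp)
      have ht : t = [] := by
        cases t with
        | nil => rfl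
        | cons c u =>
          have hc : c = a := (hma c).mp (by simp)
          exact absurd (hb.trans hc.symm ▸ hl) (by simp [hc])
      simp [hb, ht]

-- the by_chapter branch: under Pre_ (at most one distinct non-empty chapter) A's set-comprehension
-- list and B's dedup-then-filter list coincide
theorem pv_chapter_case (candidates : List (List (String × String)))
    (hpre : (PySem.List.dedup (candidates.filterMap (fun c =>
      let v := pvGetOr c "capitulo_descricao"
      if v = "" then none else some v))).length ≤ 1) :
    (PySem.Set.ofList (candidates.foldl (fun acc c =>
        let v := pvGetOr c "capitulo_descricao"
        if v ≠ "" then acc ++ [v] else acc) []) : List String).filter (fun c => c ≠ "")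
    = (PySem.List.dedup (candidates.map (fun c => pvGetOr c "capitulo_descricao"))).filter (fun c => c ≠ "") := by
  have hfm : ∀ (l : List (List (String × String))), l.filterMap (fun c =>
      let v := pvGetOr c "capitulo_descricao"
      if v = "" then none else some v)
      = (l.map (fun c => pvGetOr c "capitulo_descricao")).filter (fun v => v ≠ "") := by
    intro l
    induction l with
    | nil => rfl
    | cons c t ih =>
      by_cases h : pvGetOr c "capitulo_descricao" = "" <;>
        simp [h] <;> simp at ih <;> exact ih
  have hfold : candidates.foldl (fun acc c =>
      let v := pvGetOr c "capitulo_descricao"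
      if v ≠ "" then acc ++ [v] else acc) []
      = (candidates.map (fun c => pvGetOr c "capitulo_descricao")).filter (fun v => v ≠ "") := by
    have h2 := PySem.List.foldl_append_if (fun c => decide (pvGetOr c "capitulo_descricao" ≠ ""))
      (fun c => pvGetOr c "capitulo_descricao") candidates []
    simp only [decide_not, List.nil_append] at h2 ⊢
    rw [show (fun (acc : List String) (c : List (String × String)) =>
        let v := pvGetOr c "capitulo_descricao"
        if v ≠ "" then acc ++ [v] else acc)
      = (fun acc c => if (!decide (pvGetOr c "capitulo_descricao" = "")) = true
          then acc ++ [pvGetOr c "capitulo_descricao"] else acc) from by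
        funext acc c; simp]
    rw [h2, List.filter_map]; rfl
  rw [hfm] at hpre
  rw [hfold]
  have hid : ((PySem.Set.ofList ((candidates.map (fun c => pvGetOr c "capitulo_descricao")).filter
      (fun v => v ≠ ""))) : List String).filter (fun c => c ≠ "")
      = PySem.Set.ofList ((candidates.map (fun c => pvGetOr c "capitulo_descricao")).filter (fun v => v ≠ "")) := by
    apply List.filter_eq_self.mpr
    intro a ha
    have := (PySem.Set.mem_ofList _ a).mp ha
    simpa using (List.mem_filter.mp this).2
  rw [hid]
  symm
  apply pv_nodup_same_mem_le_one _ _ ((PySem.List.nodup_dedup _).filter _)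
    (PySem.Set.nodup_ofList _)
    _ (by rw [PySem.List.dedup_eq_ofList] at hpre; exact hpre)
  intro x
  rw [List.mem_filter, PySem.List.mem_dedup, PySem.Set.mem_ofList, List.mem_filter]

-- A's dict-building fold over candidates is the canonical grouping fold over B's pair list
theorem pv_fold_pairs (candidates : List (List (String × String))) (d : PySem.Dict String (List String)) :
    candidates.foldl (fun d c =>
      let cod := pvNormCod c
      if cod = "" then d
      else
        let pfx := if 3 ≤ PySem.Str.len cod then PySem.Str.slice cod none (some 3) else cod
        d.modify pfx [] (· ++ [cod])) d
    = (((candidates.map pvNormCod).filter (fun cod => cod ≠ "")).map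
        (fun cod => (PySem.Str.slice cod none (some 3), cod))).foldl
        (fun d p => d.modify p.1 [] (· ++ [p.2])) d := by
  induction candidates generalizing d with
  | nil => rfl
  | cons c t ih =>
    simp only [List.foldl_cons, List.map_cons, List.filter_cons]
    by_cases h : pvNormCod c = ""
    · rw [if_pos h, if_neg (fun hc => (of_decide_eq_true hc : pvNormCod c ≠ "") h), ih]
    · have hpfx : (if 3 ≤ PySem.Str.len (pvNormCod c) then PySem.Str.slice (pvNormCod c) none (some 3)
          else pvNormCod c) = PySem.Str.slice (pvNormCod c) none (some 3) := by
        by_cases h3 : 3 ≤ PySem.Str.len (pvNormCod c)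
        · rw [if_pos h3]
        · rw [if_neg h3, pv_slice3_short _ h3]
      rw [if_neg h, hpfx, if_pos (decide_eq_true h), List.map_cons, List.foldl_cons, ih]

-- the two ports agree on every input satisfying Pre_
theorem pv_main (candidates : List (List (String × String))) (by_chapter : Bool) (max_codes_per_prefix : Int)
    (hpre : by_chapter = true →
      (PySem.List.dedup (candidates.filterMap (fun c =>
        let v := pvGetOr c "capitulo_descricao"
        if v = "" then none else some v))).length ≤ 1) :
    format_causas_for_sql candidates by_chapter max_codes_per_prefix
      = format_causas_for_sql_alt candidates by_chapter max_codes_per_prefix := by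
  by_cases hc : candidates = []
  · rw [format_causas_for_sql, format_causas_for_sql_alt, if_pos hc, if_pos hc]
  · cases by_chapter with
    | true =>
      rw [format_causas_for_sql, format_causas_for_sql_alt, if_neg hc, if_neg hc]
      simp only [if_true]
      rw [pv_chapter_case candidates (hpre rfl)]
    | false =>
      rw [format_causas_for_sql, format_causas_for_sql_alt, if_neg hc, if_neg hc]
      simp only [Bool.false_eq_true, if_false]
      rw [pv_fold_pairs]
      set pairs := ((candidates.map pvNormCod).filter (fun cod => cod ≠ "")).map
        (fun cod => (PySem.Str.slice cod none (some 3), cod)) with hpairs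
      set d := pairs.foldl (fun d p => d.modify p.1 [] (· ++ [p.2])) PySem.Dict.empty with hd
      have hkeys : d.keys = PySem.Set.ofList (pairs.map (·.1)) := by
        rw [hd, PySem.Dict.keys_foldl_modify_key pairs (·.1) [] (fun _ p => (· ++ [p.2])) PySem.Dict.empty,
          PySem.Dict.keys_empty]
        rfl
      have hnodup : d.keys.Nodup := by
        rw [hkeys]; exact PySem.Set.nodup_ofList _
      have hgetD : ∀ p, d.getD p [] = (pairs.filter (fun q => q.1 == p)).map (·.2) := by
        intro p
        rw [hd, PySem.Dict.getD_foldl_modify_append pairs PySem.Dict.empty p, PySem.Dict.getD_empty]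
        rfl
      have hsorted : PySem.List.sorted d.items (fun p => p.1) false
          = (PySem.List.sorted (PySem.Set.ofList (pairs.map (·.1))) (fun x => x) false).map
              (fun k => (k, d.getD k [])) := by
        apply PySem.List.sorted_eq_of_perm_of_pairwise_lt
        · rw [PySem.Dict.items_eq_map_keys d hnodup [], hkeys]
          exact ((PySem.List.sorted_perm _ _ _).map _)
        · exact List.pairwise_map.mpr (PySem.List.sorted_ofList_pairwise_lt _)
      rw [hsorted, PySem.List.dedup_eq_ofList]
      have hfun : (fun (parts : List String) (pc : String × List String) =>
          if max_codes_per_prefix < ((PySem.List.dedup pc.2).length : Int) then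
            parts ++ ["causa_basica LIKE '" ++ pc.1 ++ "%'"]
          else
            parts ++ ["causa_basica IN (" ++ PySem.Str.join ", " ((PySem.List.dedup pc.2).map pvQuote) ++ ")"])
          = (fun parts pc => parts ++
              [if max_codes_per_prefix < ((PySem.List.dedup pc.2).length : Int) then
                "causa_basica LIKE '" ++ pc.1 ++ "%'"
              else
                "causa_basica IN (" ++ PySem.Str.join ", " ((PySem.List.dedup pc.2).map pvQuote) ++ ")"]) := by
        funext parts pc
        by_cases h : max_codes_per_prefix < ((PySem.List.dedup pc.2).length : Int)
        · rw [if_pos h, if_pos h]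
        · rw [if_neg h, if_neg h]
      rw [hfun, PySem.List.foldl_append_singleton_eq_map
        (fun (pc : String × List String) =>
          if max_codes_per_prefix < ((PySem.List.dedup pc.2).length : Int) then
            "causa_basica LIKE '" ++ pc.1 ++ "%'"
          else
            "causa_basica IN (" ++ PySem.Str.join ", " ((PySem.List.dedup pc.2).map pvQuote) ++ ")")]
      rw [List.map_map, List.nil_append]
      set S := PySem.List.sorted (PySem.Set.ofList (pairs.map (·.1))) (fun x => x) false with hS
      have hmapeq : S.map ((fun (pc : String × List String) =>
          if max_codes_per_prefix < ((PySem.List.dedup pc.2).length : Int) then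
            "causa_basica LIKE '" ++ pc.1 ++ "%'"
          else
            "causa_basica IN (" ++ PySem.Str.join ", " ((PySem.List.dedup pc.2).map pvQuote) ++ ")")
          ∘ (fun k => (k, d.getD k [])))
          = S.map (fun pfx =>
            let codes := PySem.List.dedup ((pairs.filter (fun p => p.1 == pfx)).map (·.2))
            if max_codes_per_prefix < (codes.length : Int) then
              "causa_basica LIKE '" ++ pfx ++ "%'"
            else
              "causa_basica IN (" ++ PySem.Str.join ", " (codes.map pvQuote) ++ ")") := by
        apply List.map_congr_left
        intro k _
        simp only [Function.comp]
        rw [hgetD k]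
      rw [hmapeq]
      by_cases hp : (S.map (fun pfx =>
          let codes := PySem.List.dedup ((pairs.filter (fun p => p.1 == pfx)).map (·.2))
          if max_codes_per_prefix < (codes.length : Int) then
            "causa_basica LIKE '" ++ pfx ++ "%'"
          else
            "causa_basica IN (" ++ PySem.Str.join ", " (codes.map pvQuote) ++ ")")) = []
      · rw [if_neg (not_not_intro hp), hp]
        rfl
      · rw [if_pos hp]

-- ===== VERDICT (by name: the statement is the Claim_ definition above) =====
theorem format_causas_for_sql_spec : Claim_equal_format_causas_for_sql := by
  intro candidates by_chapter max_codes_per_prefix _ hpre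
  unfold Spec_format_causas_for_sql
  exact pv_main candidates by_chapter max_codes_per_prefix hpre
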